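-- pv_equiv track=rewrite | github.com/duri12/encoding_project | test.py | check_prop1
-- ===== SOURCE A (Python) =====
-- import itertools
--
-- n = 1  # number of cells per codeword
--
-- l = 32  # levels
--
-- k = 5  # number of bits to store
--
-- def decision(v, R):
--     b = 1
--     for r in sorted(R):
--         if r <= v:
--             b ^= 1
--         else:
--             break
--     return b
--
-- def decode_bit(candidate_pair, v):
--     R, D = candidate_pair
--     bits = [decision(v[j], R[j]) for j in range(n)]
--     index = sum(bits[j] * (2 ** j) for j in range(n))
--     return D[index]
--
-- def check_prop1(candidate_r, candidate_d):
--     counters = [0, 0]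
--     THRESHOLD = pow(2, k - 1)
--     for v in itertools.product(range(l), repeat=n):
--         out = decode_bit((candidate_r, candidate_d), v)
--         counters[out] += 1
--         if counters[0] >= THRESHOLD and counters[1] >= THRESHOLD:
--             return True
--     return False
-- ===== SOURCE B (Python) =====
-- def check_prop1(candidate_r, candidate_d):
--     # Interval sweep: sort the thresholds once and walk the level axis 0..31 by
--     # runs of equal threshold-count; the decoded bit is 1 exactly on runs where
--     # that count is even, so count bit-1 levels by run lengths, then do two
--     # aggregate counter updates instead of 32 per-level decodes.
--     n1 = 0              # levels decoding to bit 1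
--     lo = 0              # start of the current run, clamped into [0, 32]
--     parity_even = True  # threshold-count is even on the current run
--     for t in sorted(candidate_r[0]):
--         hi = min(max(t, 0), 32)
--         if parity_even:
--             n1 += hi - lo
--         lo = hi
--         parity_even = not parity_even
--     if parity_even:
--         n1 += 32 - lo
--     counts = [0, 0]
--     for b, nb in ((1, n1), (0, 32 - n1)):
--         if nb:
--             counts[candidate_d[b]] += nb
--     return counts[0] >= 16 and counts[1] >= 16
-- ===== Notes on version B (the rewrite author's own statement) =====
-- stated objective: faster
-- what changed: B replaces A's 32 per-level decodes (each of which sorts the thresholds and scans them with a break) by one sort followed by a single interval sweep over the sorted thresholds that counts the bit-1 levels via run lengths with alternating parity, and then performs just two aggregate counter updates instead of 32 incremental ones, testing the thresholds once at the end instead of A's per-iteration early-return check.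
import Mathlib
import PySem

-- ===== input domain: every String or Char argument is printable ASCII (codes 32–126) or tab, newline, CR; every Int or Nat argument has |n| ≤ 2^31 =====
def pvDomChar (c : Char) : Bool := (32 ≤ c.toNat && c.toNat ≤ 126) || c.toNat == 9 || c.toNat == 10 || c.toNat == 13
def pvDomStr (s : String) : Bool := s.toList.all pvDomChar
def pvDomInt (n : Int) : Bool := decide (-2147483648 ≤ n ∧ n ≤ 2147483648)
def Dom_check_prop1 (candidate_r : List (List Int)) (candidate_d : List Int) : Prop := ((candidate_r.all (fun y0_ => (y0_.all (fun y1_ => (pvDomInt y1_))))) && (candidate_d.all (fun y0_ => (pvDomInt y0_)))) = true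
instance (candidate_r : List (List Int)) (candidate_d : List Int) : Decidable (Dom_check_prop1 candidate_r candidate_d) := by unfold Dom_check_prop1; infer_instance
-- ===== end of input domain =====

-- B replaces A's 32 per-level decodes (each sorting the thresholds) by one sort and one
-- interval sweep over the sorted thresholds plus two aggregate counter updates; equal
-- return values proved on Pre_.

-- ===== PORT A =====
-- module constants n, l, k
def pvN : Int := 1
def pvL : Int := 32
def pvK : Int := 5

-- 'for r in sorted(R): if r <= v: b ^= 1 else: break'; 'b ^= 1' is ported as '1 - b',
-- exact because b stays in {0,1}.
def pvDecisionLoop (v : Int) (b : Int) : List Int → Int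
  | [] => b
  | r :: rs => if r ≤ v then pvDecisionLoop v (1 - b) rs else b

def pvDecision (v : Int) (R : List Int) : Int :=
  pvDecisionLoop v 1 (PySem.List.sorted R (fun x => x) false)

-- decode_bit; none = the IndexError paths (v[j], R[j], D[index]); bits[j] in the index sum
-- always hits an existing entry, so pyGetD there is exact.
def pvDecodeBit (candidate_pair : List (List Int) × List Int) (v : List Int) : Option Int :=
  let R := candidate_pair.1
  let D := candidate_pair.2
  match (PySem.List.pyRange 0 pvN 1).mapM (fun j => do
      let vj ← PySem.List.pyGet? v j
      let Rj ← PySem.List.pyGet? R j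
      pure (pvDecision vj Rj)) with
  | none => none
  | some bits =>
      let index := (PySem.List.pyRange 0 pvN 1).foldl
        (fun acc j => acc + PySem.List.pyGetD bits j 0 * 2 ^ j.toNat) 0
      PySem.List.pyGet? D index

-- itertools.product(base, repeat=m)
def pvProduct (base : List Int) : Nat → List (List Int)
  | 0 => [[]]
  | m + 1 => base.flatMap (fun x => (pvProduct base m).map (x :: ·))

-- 'counters[out] += 1'; none = the IndexError path
def pvIncr? (cs : List Int) (out : Int) : Option (List Int) :=
  match PySem.List.pyGet? cs out with
  | none => none
  | some c => PySem.List.pySet? cs out (c + 1)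

-- the main loop; 'false' on the none-branches stands for the Python exception (excluded by Pre_)
def pvLoop (candidate_r : List (List Int)) (candidate_d : List Int) :
    List (List Int) → List Int → Bool
  | [], _ => false
  | v :: vs, counters =>
    match pvDecodeBit (candidate_r, candidate_d) v with
    | none => false
    | some out =>
      match pvIncr? counters out with
      | none => false
      | some counters' =>
        let THRESHOLD : Int := 2 ^ (pvK - 1).toNat
        if THRESHOLD ≤ PySem.List.pyGetD counters' 0 0 ∧
           THRESHOLD ≤ PySem.List.pyGetD counters' 1 0 then true
        else pvLoop candidate_r candidate_d vs counters'

def check_prop1 (candidate_r : List (List Int)) (candidate_d : List Int) : Bool :=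
  pvLoop candidate_r candidate_d (pvProduct (PySem.List.pyRange 0 pvL 1) pvN.toNat) [0, 0]

-- ===== PORT B =====
-- transliteration of Source B: one step of the sweep over sorted thresholds
-- (state = (n1, lo, parity_even)); hi = min(max(t, 0), 32)
def pvSweepStep (s : Int × Int × Bool) (t : Int) : Int × Int × Bool :=
  let hi := min (max t 0) 32
  ((if s.2.2 then s.1 + (hi - s.2.1) else s.1), hi, !s.2.2)

-- counts[o] += nb  (pySetD/pyGetD = Python's negative-wrapping list indexing, total form;
-- exact under Pre_check_prop1)
def pvBump (cs : List Int) (o nb : Int) : List Int :=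
  PySem.List.pySetD cs o (PySem.List.pyGetD cs o 0 + nb)

-- transliteration of Source B; candidate_r[0] as pyGetD (exact under Pre_, which demands
-- candidate_r ≠ [])
def check_prop1_alt (candidate_r : List (List Int)) (candidate_d : List Int) : Bool :=
  let st := (PySem.List.sorted (PySem.List.pyGetD candidate_r 0 []) (fun x => x) false).foldl
      pvSweepStep ((0 : Int), (0 : Int), true)
  let n1 := if st.2.2 then st.1 + (32 - st.2.1) else st.1
  let counts := ([(1, n1), (0, 32 - n1)] : List (Int × Int)).foldl
    (fun cs p => if p.2 ≠ 0 then pvBump cs (PySem.List.pyGetD candidate_d p.1 0) p.2 else cs)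
    ([0, 0] : List Int)
  decide (16 ≤ PySem.List.pyGetD counts 0 0) && decide (16 ≤ PySem.List.pyGetD counts 1 0)

-- ===== PRECONDITION & SPEC =====
-- the decode index reached at level v, and the bounds Python needs at that level:
-- D has that entry and its value is a legal index into the two counters
def pvGoodV (R0 : List Int) (D : List Int) (v : Int) : Prop :=
  (R0.countP (fun r => r ≤ v) + 1) % 2 < D.length ∧
  -2 ≤ D.getD ((R0.countP (fun r => r ≤ v) + 1) % 2) 0 ∧
  D.getD ((R0.countP (fun r => r ≤ v) + 1) % 2) 0 ≤ 1

-- exactly the inputs on which the Python A returns: candidate_r nonempty (else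
-- candidate_r[0] raises), and at every level v the accessed D entry exists and lies in
-- [-2, 1] (else D[index] or counters[out] raises IndexError)
def Pre_check_prop1 (candidate_r : List (List Int)) (candidate_d : List Int) : Prop :=
  candidate_r ≠ [] ∧
  ∀ v ∈ PySem.List.pyRange 0 32 1, pvGoodV (candidate_r.headD []) candidate_d v

instance (candidate_r : List (List Int)) (candidate_d : List Int) :
    Decidable (Pre_check_prop1 candidate_r candidate_d) := by
  unfold Pre_check_prop1 pvGoodV; infer_instance

def pvWitness_check_prop1 : List (List Int) × List Int := ([[0]], [0, 1])

def Spec_check_prop1 (candidate_r : List (List Int)) (candidate_d : List Int) (out : Bool) : Prop := out = check_prop1_alt candidate_r candidate_d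
instance (candidate_r : List (List Int)) (candidate_d : List Int) (out : Bool) : Decidable (Spec_check_prop1 candidate_r candidate_d out) := by unfold Spec_check_prop1; infer_instance

-- ===== CLAIM (what is proved, stated in full; the proofs are below) =====
def Claim_equal_check_prop1 : Prop := ∀ (candidate_r : List (List Int)) (candidate_d : List Int), Dom_check_prop1 candidate_r candidate_d → Pre_check_prop1 candidate_r candidate_d → Spec_check_prop1 candidate_r candidate_d (check_prop1 candidate_r candidate_d)

-- ===== LEMMAS AND PROOFS =====

-- the decoded table value at level v, and 'goes to counter 0'
def pvOut (R0 D : List Int) (v : Int) : Int :=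
  D.getD ((R0.countP (fun r => r ≤ v) + 1) % 2) 0

def pvP (o : Int) : Bool := decide (o = 0 ∨ o = -2)

-- the break-loop over a sorted list toggles once per element ≤ v
lemma decisionLoop_sorted (v : Int) :
    ∀ (S : List Int), S.Pairwise (· ≤ ·) → ∀ b : Int,
      pvDecisionLoop v b S =
        if (S.countP (fun r => r ≤ v)) % 2 = 0 then b else 1 - b := by
  intro S
  induction S with
  | nil => intro _ b; simp [pvDecisionLoop]
  | cons r rs ih =>
    intro hp b
    rcases List.pairwise_cons.mp hp with ⟨hr, hrs⟩
    by_cases h : r ≤ v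
    · have hcons := ih hrs (1 - b)
      simp only [pvDecisionLoop, if_pos h, hcons]
      have hc : (r :: rs).countP (fun r => r ≤ v) = rs.countP (fun r => r ≤ v) + 1 := by
        simp [h]
      rw [hc]
      rcases Nat.mod_two_eq_zero_or_one (rs.countP (fun r => r ≤ v)) with h0 | h0
      · have h1 : (rs.countP (fun r => r ≤ v) + 1) % 2 = 1 := by omega
        simp [h0, h1]
      · have h1 : (rs.countP (fun r => r ≤ v) + 1) % 2 = 0 := by omega
        simp only [h0, h1]
        norm_num
    · have hc : (r :: rs).countP (fun r => r ≤ v) = 0 := by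
        rw [List.countP_eq_zero]
        intro x hx
        rcases List.mem_cons.mp hx with rfl | hx'
        · simpa using h
        · have : r ≤ x := hr x hx'
          simp only [decide_eq_true_eq]
          omega
      simp [pvDecisionLoop, if_neg h, hc]

-- decision(v, R) in terms of the parity of the count of r ≤ v
lemma decision_eq (v : Int) (R0 : List Int) :
    pvDecision v R0 =
      if (R0.countP (fun r => r ≤ v)) % 2 = 0 then 1 else 0 := by
  unfold pvDecision
  rw [decisionLoop_sorted v _ (PySem.List.sorted_pairwise R0 (fun x => x)) 1]
  rw [((PySem.List.sorted_perm R0 (fun x => x) false)).countP_eq]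
  split <;> norm_num

-- decode_bit for n = 1, on a nonempty candidate_r
lemma decodeBit_eq (R : List (List Int)) (D : List Int) (v : Int) (hR : R ≠ []) :
    pvDecodeBit (R, D) [v] =
      PySem.List.pyGet? D (pvDecision v (R.headD [])) := by
  obtain ⟨R0, Rs, rfl⟩ : ∃ h t, R = h :: t := by
    cases R with
    | nil => exact absurd rfl hR
    | cons h t => exact ⟨h, t, rfl⟩
  have h1 : PySem.List.pyRange 0 pvN 1 = [0] := by decide
  simp only [pvDecodeBit, h1, List.mapM_cons, List.mapM_nil,
    PySem.List.pyGet?_zero_cons, List.foldl_cons, List.foldl_nil, List.headD_cons]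
  simp [PySem.List.pyGetD_zero_cons]

-- product(range(l), repeat=1) is the list of singleton levels
lemma product_one (base : List Int) :
    pvProduct base 1 = base.map (fun v => [v]) := by
  induction base with
  | nil => rfl
  | cons x xs ih => simp_all [pvProduct]

-- A's bit, as an Int, is the Nat (c+1) % 2
lemma bit_eq (c : Nat) :
    (if c % 2 = 0 then (1 : Int) else 0) = ((c + 1) % 2 : Nat) := by
  rcases Nat.mod_two_eq_zero_or_one c with h0 | h0 <;>
    · have h1 : (c + 1) % 2 = 1 - c % 2 := by omega
      simp [h0, h1]

-- one A-step: decode succeeds with pvOut, and the increment bumps the counter pvP selects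
lemma stepA (R : List (List Int)) (D : List Int) (v : Int) (hR : R ≠ [])
    (hg : pvGoodV (R.headD []) D v) (c0 c1 : Int) :
    pvDecodeBit (R, D) [v] = some (pvOut (R.headD []) D v) ∧
      pvIncr? [c0, c1] (pvOut (R.headD []) D v) =
        some (if pvP (pvOut (R.headD []) D v) then [c0 + 1, c1] else [c0, c1 + 1]) := by
  obtain ⟨hb, hlo, hhi⟩ := hg
  have hdec : pvDecision v (R.headD []) =
      ((((R.headD []).countP (fun r => r ≤ v) + 1) % 2 : Nat) : Int) := by
    rw [decision_eq]; exact bit_eq _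
  constructor
  · rw [decodeBit_eq R D v hR, hdec, PySem.List.pyGet?_natCast,
      List.getElem?_eq_getElem hb]
    unfold pvOut
    rw [List.getD_eq_getElem D 0 hb]
  · unfold pvOut
    set o := D.getD (((R.headD []).countP (fun r => r ≤ v) + 1) % 2) 0 with ho
    have : -2 ≤ o ∧ o ≤ 1 := ⟨hlo, hhi⟩
    obtain ⟨h1, h2⟩ := this
    interval_cases o <;> rfl

-- the main loop with its early return equals the two level-counts tested at the end
lemma loopA (R : List (List Int)) (D : List Int) (hR : R ≠ []) :
    ∀ (ws : List Int), (∀ v ∈ ws, pvGoodV (R.headD []) D v) →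
    ∀ c0 c1 : Int, ¬ (16 ≤ c0 ∧ 16 ≤ c1) →
      pvLoop R D (ws.map (fun v => [v])) [c0, c1] =
        (decide (16 ≤ c0 + (ws.countP (fun v => pvP (pvOut (R.headD []) D v)) : Int)) &&
         decide (16 ≤ c1 + (ws.countP (fun v => !pvP (pvOut (R.headD []) D v)) : Int))) := by
  intro ws
  induction ws with
  | nil =>
    intro _ c0 c1 hlt
    simp only [List.map_nil, List.countP_nil, Nat.cast_zero, add_zero, pvLoop]
    rcases not_and_or.mp hlt with h | h <;> simp [h]
  | cons v vs ih =>
    intro hg c0 c1 hlt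
    obtain ⟨hdec, hincr⟩ := stepA R D v hR (hg v List.mem_cons_self) c0 c1
    have hg' : ∀ w ∈ vs, pvGoodV (R.headD []) D w := fun w hw => hg w (List.mem_cons_of_mem _ hw)
    have hT : (2 : Int) ^ (pvK - 1).toNat = 16 := by decide
    have hc0 : (0 : Int) ≤ (vs.countP (fun w => pvP (pvOut (R.headD []) D w)) : Int) := by positivity
    have hc1 : (0 : Int) ≤ (vs.countP (fun w => !pvP (pvOut (R.headD []) D w)) : Int) := by positivity
    by_cases hP : pvP (pvOut (R.headD []) D v) = true
    · rw [if_pos hP] at hincr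
      have hnot : ¬((!pvP (pvOut (R.headD []) D v)) = true) := by rw [hP]; decide
      have hsum0 : (((v :: vs).countP (fun w => pvP (pvOut (R.headD []) D w)) : Nat) : Int)
          = (vs.countP (fun w => pvP (pvOut (R.headD []) D w)) : Int) + 1 := by
        rw [List.countP_cons, if_pos hP]; push_cast; ring
      have hsum1 : (((v :: vs).countP (fun w => !pvP (pvOut (R.headD []) D w)) : Nat) : Int)
          = (vs.countP (fun w => !pvP (pvOut (R.headD []) D w)) : Int) := by
        rw [List.countP_cons, if_neg hnot]; push_cast; ring
      have e0 : PySem.List.pyGetD [c0 + 1, c1] 0 0 = c0 + 1 := rfl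
      have e1 : PySem.List.pyGetD [c0 + 1, c1] 1 0 = c1 := rfl
      simp only [List.map_cons, pvLoop, hdec, hincr, hT, e0, e1]
      rw [hsum0, hsum1]
      split_ifs with hcond
      · have g1 : (16 : Int) ≤ c0 + ((vs.countP (fun w => pvP (pvOut (R.headD []) D w)) : Int) + 1) := by omega
        have g2 : (16 : Int) ≤ c1 + (vs.countP (fun w => !pvP (pvOut (R.headD []) D w)) : Int) := by omega
        rw [decide_eq_true g1, decide_eq_true g2]; rfl
      · rw [ih hg' (c0 + 1) c1 hcond]
        have harr : c0 + 1 + (vs.countP (fun w => pvP (pvOut (R.headD []) D w)) : Int)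
            = c0 + ((vs.countP (fun w => pvP (pvOut (R.headD []) D w)) : Int) + 1) := by ring
        rw [harr]
    · rw [if_neg hP] at hincr
      have hPf : pvP (pvOut (R.headD []) D v) = false := by
        cases hPP : pvP (pvOut (R.headD []) D v)
        · rfl
        · exact absurd hPP hP
      have hyes : (!pvP (pvOut (R.headD []) D v)) = true := by rw [hPf]; decide
      have hsum0 : (((v :: vs).countP (fun w => pvP (pvOut (R.headD []) D w)) : Nat) : Int)
          = (vs.countP (fun w => pvP (pvOut (R.headD []) D w)) : Int) := by
        rw [List.countP_cons, if_neg hP]; push_cast; ring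
      have hsum1 : (((v :: vs).countP (fun w => !pvP (pvOut (R.headD []) D w)) : Nat) : Int)
          = (vs.countP (fun w => !pvP (pvOut (R.headD []) D w)) : Int) + 1 := by
        rw [List.countP_cons, if_pos hyes]; push_cast; ring
      have e0 : PySem.List.pyGetD [c0, c1 + 1] 0 0 = c0 := rfl
      have e1 : PySem.List.pyGetD [c0, c1 + 1] 1 0 = c1 + 1 := rfl
      simp only [List.map_cons, pvLoop, hdec, hincr, hT, e0, e1]
      rw [hsum0, hsum1]
      split_ifs with hcond
      · have g1 : (16 : Int) ≤ c0 + (vs.countP (fun w => pvP (pvOut (R.headD []) D w)) : Int) := by omega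
        have g2 : (16 : Int) ≤ c1 + ((vs.countP (fun w => !pvP (pvOut (R.headD []) D w)) : Int) + 1) := by omega
        rw [decide_eq_true g1, decide_eq_true g2]; rfl
      · rw [ih hg' c0 (c1 + 1) hcond]
        have harr : c1 + 1 + (vs.countP (fun w => !pvP (pvOut (R.headD []) D w)) : Int)
            = c1 + ((vs.countP (fun w => !pvP (pvOut (R.headD []) D w)) : Int) + 1) := by ring
        rw [harr]

-- flipping the parity target across one more threshold
lemma parity_flip (c : Nat) (pe : Bool) :
    decide ((c + 1) % 2 = (if pe then 0 else 1)) = decide (c % 2 = (if !pe then 0 else 1)) := by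
  cases pe
  · show decide ((c + 1) % 2 = 1) = decide (c % 2 = 0)
    exact decide_eq_decide.mpr (by omega)
  · show decide ((c + 1) % 2 = 0) = decide (c % 2 = 1)
    exact decide_eq_decide.mpr (by omega)

-- the sweep invariant: starting at lo with parity flag pe, the sweep adds the number of
-- levels v in [lo, 32) whose threshold-count has the parity pe selects
lemma sweep_inv :
    ∀ (ts : List Int), ts.Pairwise (· ≤ ·) →
    ∀ (lo n1 : Int) (pe : Bool), 0 ≤ lo → lo ≤ 32 →
      (∀ t ∈ ts, lo ≤ min (max t 0) 32) →
      (if (ts.foldl pvSweepStep (n1, lo, pe)).2.2 then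
          (ts.foldl pvSweepStep (n1, lo, pe)).1 + (32 - (ts.foldl pvSweepStep (n1, lo, pe)).2.1)
        else (ts.foldl pvSweepStep (n1, lo, pe)).1) =
      n1 + ((PySem.List.pyRange lo 32 1).countP
        (fun v => decide ((ts.countP (fun t => t ≤ v)) % 2 = (if pe then 0 else 1))) : Int) := by
  intro ts
  induction ts with
  | nil =>
    intro _ lo n1 pe h0 h32 _
    simp only [List.foldl_nil, List.countP_nil]
    cases pe
    · simp
    · simp only [if_true]
      rw [List.countP_eq_length.mpr (fun v _ => by decide), PySem.List.length_pyRange_one]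
      omega
  | cons t rest ih =>
    intro hp lo n1 pe h0 h32 hcl
    rcases List.pairwise_cons.mp hp with ⟨hts, hrest⟩
    set h := min (max t 0) 32 with hh
    have hlh : lo ≤ h := hcl t List.mem_cons_self
    have hh0 : 0 ≤ h := by omega
    have hh32 : h ≤ 32 := by omega
    have hclrest : ∀ t' ∈ rest, h ≤ min (max t' 0) 32 := by
      intro t' ht'
      have := hts t' ht'
      omega
    have hstep : pvSweepStep (n1, lo, pe) t = ((if pe then n1 + (h - lo) else n1), h, !pe) := rfl
    rw [List.foldl_cons, hstep, ih hrest h _ (!pe) hh0 hh32 hclrest]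
    rw [PySem.List.pyRange_one_append lo h 32 hlh hh32, List.countP_append]
    -- first piece: every level below h sees no threshold
    have hpiece1 : (PySem.List.pyRange lo h 1).countP
        (fun v => decide (((t :: rest).countP (fun t => t ≤ v)) % 2 = (if pe then 0 else 1)))
        = (if pe then (h - lo).toNat else 0) := by
      have hzero : ∀ v ∈ PySem.List.pyRange lo h 1,
          ((t :: rest).countP (fun t => t ≤ v)) = 0 := by
        intro v hv
        rw [PySem.List.mem_pyRange_one] at hv
        rw [List.countP_eq_zero]
        intro x hx
        simp only [decide_eq_true_eq]
        rcases List.mem_cons.mp hx with rfl | hx'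
        · omega
        · have := hclrest x hx'
          omega
      calc (PySem.List.pyRange lo h 1).countP
            (fun v => decide (((t :: rest).countP (fun t => t ≤ v)) % 2 = (if pe then 0 else 1)))
          = (PySem.List.pyRange lo h 1).countP
            (fun v => decide ((0 : Nat) % 2 = (if pe then 0 else 1))) := by
            apply List.countP_congr
            intro v hv
            rw [hzero v hv]
        _ = _ := by
            cases pe
            · simp
            · simp only [if_true]
              simp [List.countP_true, PySem.List.length_pyRange_one]
    -- second piece: every level from h on sees t, so the parity target flips
    have hpiece2 : (PySem.List.pyRange h 32 1).countP
        (fun v => decide (((t :: rest).countP (fun t => t ≤ v)) % 2 = (if pe then 0 else 1)))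
        = (PySem.List.pyRange h 32 1).countP
        (fun v => decide ((rest.countP (fun t => t ≤ v)) % 2 = (if !pe then 0 else 1))) := by
      apply List.countP_congr
      intro v hv
      rw [PySem.List.mem_pyRange_one] at hv
      have htv : t ≤ v := by omega
      have hc : (t :: rest).countP (fun t => t ≤ v) = rest.countP (fun t => t ≤ v) + 1 := by
        simp [htv]
      rw [hc, parity_flip (rest.countP (fun t => t ≤ v)) pe]
    rw [hpiece1, hpiece2]
    cases pe
    · simp only [if_false, Bool.not_false]
      push_cast
      ring
    · simp only [if_true, Bool.not_true]
      have : ((h - lo).toNat : Int) = h - lo := by omega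
      push_cast [this]
      ring

-- splitting a level-count over the decoded bit
lemma countP_out_split (R0 D : List Int) (pq : Int → Bool) :
    ∀ ws : List Int,
      ws.countP (fun v => pq (pvOut R0 D v))
        = (if pq (D.getD 1 0) then
            ws.countP (fun v => decide ((R0.countP (fun r => r ≤ v)) % 2 = 0)) else 0)
          + (if pq (D.getD 0 0) then
            ws.countP (fun v => !decide ((R0.countP (fun r => r ≤ v)) % 2 = 0)) else 0) := by
  intro ws
  set d1 := D.getD 1 0 with hd1
  set d0 := D.getD 0 0 with hd0
  induction ws with
  | nil => simp
  | cons v vs ih =>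
    rw [List.countP_cons, List.countP_cons, List.countP_cons, ih]
    by_cases hpar : (R0.countP (fun r => r ≤ v)) % 2 = 0
    · have hidx : (R0.countP (fun r => r ≤ v) + 1) % 2 = 1 := by omega
      have hout : pvOut R0 D v = d1 := by
        unfold pvOut; rw [hidx]
      rw [hout]
      cases hq : pq d1 <;> cases hq0 : pq d0 <;> simp [hq, hq0, hpar] <;> try omega
    · have hidx : (R0.countP (fun r => r ≤ v) + 1) % 2 = 0 := by omega
      have hout : pvOut R0 D v = d0 := by
        unfold pvOut; rw [hidx]; try exact hd0.symm
      rw [hout]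
      cases hq : pq d1 <;> cases hq0 : pq d0 <;> simp [hq, hq0, hpar] <;> try omega

-- bump on a two-element list, for a decoded value in [-2, 1]
lemma bump_eq (a b o nb : Int) (hlo : -2 ≤ o) (hhi : o ≤ 1) :
    pvBump [a, b] o nb = if pvP o then [a + nb, b] else [a, b + nb] := by
  interval_cases o <;> rfl

-- counting the complement
lemma countP_not_eq (l : List Int) (p : Int → Bool) :
    l.countP (fun v => !p v) = l.length - l.countP p := by
  induction l with
  | nil => simp
  | cons a l ih =>
    have hle := List.countP_le_length (p := p) (l := l)
    rw [List.countP_cons, List.countP_cons, ih, List.length_cons]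
    cases h : p a <;> simp [h] <;> omega

-- numeral-index lookups, once and for all
lemma pyGetD_one_eq (D : List Int) : PySem.List.pyGetD D 1 0 = D.getD 1 0 := by
  rw [show (1 : Int) = ((1 : Nat) : Int) from rfl, PySem.List.pyGetD_natCast]

lemma pyGetD_zero_eq (D : List Int) : PySem.List.pyGetD D 0 0 = D.getD 0 0 := by
  rw [show (0 : Int) = ((0 : Nat) : Int) from rfl, PySem.List.pyGetD_natCast]

-- B's two guarded aggregate updates, written out
lemma counts_eval (D : List Int) (a : Int) (h32 : a ≤ 32)
    (hb1 : a ≠ 0 → -2 ≤ D.getD 1 0 ∧ D.getD 1 0 ≤ 1)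
    (hb0 : a ≠ 32 → -2 ≤ D.getD 0 0 ∧ D.getD 0 0 ≤ 1) :
    ([((1 : Int), a), ((0 : Int), 32 - a)] : List (Int × Int)).foldl
      (fun cs p => if p.2 ≠ 0 then pvBump cs (PySem.List.pyGetD D p.1 0) p.2 else cs)
      ([0, 0] : List Int)
    = [(if pvP (D.getD 1 0) then a else 0) + (if pvP (D.getD 0 0) then 32 - a else 0),
       (if !pvP (D.getD 1 0) then a else 0) + (if !pvP (D.getD 0 0) then 32 - a else 0)] := by
  set d1 := D.getD 1 0 with hd1
  set d0 := D.getD 0 0 with hd0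
  have hg1 : PySem.List.pyGetD D 1 0 = d1 := by rw [hd1]; exact pyGetD_one_eq D
  have hg0 : PySem.List.pyGetD D 0 0 = d0 := by rw [hd0]; exact pyGetD_zero_eq D
  simp only [List.foldl_cons, List.foldl_nil, hg1, hg0]
  by_cases ha0 : a = 0
  · subst ha0
    obtain ⟨l0, h0'⟩ := hb0 (by norm_num)
    norm_num
    rw [bump_eq _ _ _ _ l0 h0']
    cases hq : pvP d0 <;> simp [hq]
  · by_cases ha32 : a = 32
    · subst ha32
      obtain ⟨l1, h1'⟩ := hb1 (by norm_num)
      norm_num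
      rw [bump_eq _ _ _ _ l1 h1']
      cases hq : pvP d1 <;> simp [hq]
    · obtain ⟨l1, h1'⟩ := hb1 ha0
      obtain ⟨l0, h0'⟩ := hb0 ha32
      have hne : (32 : Int) - a ≠ 0 := by omega
      rw [if_pos ha0, bump_eq _ _ _ _ l1 h1']
      cases hq1 : pvP d1 <;>
        · norm_num [hne]
          rw [bump_eq _ _ _ _ l0 h0']
          cases hq0 : pvP d0 <;> simp <;> ring

-- Bool-valued conjunction of two decides, rewritten through two iffs
lemma and_congr_decide {p q p' q' : Prop} [Decidable p] [Decidable q] [Decidable p'] [Decidable q']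
    (h1 : p ↔ p') (h2 : q ↔ q') : (decide p && decide q) = (decide p' && decide q') := by
  rw [decide_eq_decide.mpr h1, decide_eq_decide.mpr h2]

-- ===== VERDICT (by name: the statement is the Claim_ definition above) =====
theorem check_prop1_spec : Claim_equal_check_prop1 := by
  intro R D _ hpre
  obtain ⟨hR, hg⟩ := hpre
  unfold Spec_check_prop1
  have hhead : PySem.List.pyGetD R 0 [] = R.headD [] := by
    cases R with
    | nil => exact absurd rfl hR
    | cons x xs => simp [PySem.List.pyGetD_zero]
  -- A's value as the two level-counts
  have hA : check_prop1 R D =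
      (decide (16 ≤ (0 : Int) + ((PySem.List.pyRange 0 32 1).countP
          (fun v => pvP (pvOut (R.headD []) D v)) : Int)) &&
       decide (16 ≤ (0 : Int) + ((PySem.List.pyRange 0 32 1).countP
          (fun v => !pvP (pvOut (R.headD []) D v)) : Int))) := by
    have hprod : pvProduct (PySem.List.pyRange 0 pvL 1) pvN.toNat =
        (PySem.List.pyRange 0 32 1).map (fun v => [v]) := by
      rw [show pvN.toNat = 1 from rfl, product_one, show pvL = (32 : Int) from rfl]
    have h1 : check_prop1 R D =
        pvLoop R D ((PySem.List.pyRange 0 32 1).map (fun v => [v])) [0, 0] := by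
      unfold check_prop1
      rw [hprod]
    rw [h1]
    exact loopA R D hR _ hg 0 0 (by omega)
  -- the even-parity level count
  have hts : ∀ ws : List Int,
      ws.countP (fun v => decide
        (((PySem.List.sorted (R.headD []) (fun x => x) false).countP (fun t => t ≤ v)) % 2
          = (if true then 0 else 1)))
      = ws.countP (fun v => decide ((R.headD []).countP (fun r => r ≤ v) % 2 = 0)) := by
    intro ws
    apply List.countP_congr
    intro v _
    rw [(PySem.List.sorted_perm (R.headD []) (fun x => x) false).countP_eq]
    exact Iff.rfl
  have hlen : (PySem.List.pyRange 0 32 1).length = 32 := by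
    rw [PySem.List.length_pyRange_one]; rfl
  have hN1le := List.countP_le_length
    (p := fun v => decide ((R.headD []).countP (fun r => r ≤ v) % 2 = 0))
    (l := PySem.List.pyRange 0 32 1)
  rw [hlen] at hN1le
  have hNodd := countP_not_eq (PySem.List.pyRange 0 32 1)
    (fun v => decide ((R.headD []).countP (fun r => r ≤ v) % 2 = 0))
  rw [hlen] at hNodd
  -- the sweep computes that count
  have hclamp : ∀ t ∈ PySem.List.sorted (R.headD []) (fun x => x) false,
      (0 : Int) ≤ min (max t 0) 32 := by intro t _; omega
  have hsw := sweep_inv (PySem.List.sorted (R.headD []) (fun x => x) false)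
      (PySem.List.sorted_pairwise (R.headD []) (fun x => x)) 0 0 true (le_refl 0)
      (by norm_num) hclamp
  rw [hts (PySem.List.pyRange 0 32 1), zero_add] at hsw
  -- the value bounds Pre_ yields at each used table slot
  have hbound1 : ((PySem.List.pyRange 0 32 1).countP
        (fun v => decide ((R.headD []).countP (fun r => r ≤ v) % 2 = 0)) : Int) ≠ 0 →
      -2 ≤ D.getD 1 0 ∧ D.getD 1 0 ≤ 1 := by
    intro hne
    have hpos : 0 < (PySem.List.pyRange 0 32 1).countP
        (fun v => decide ((R.headD []).countP (fun r => r ≤ v) % 2 = 0)) := by omega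
    obtain ⟨v, hv, hpv⟩ := List.countP_pos_iff.mp hpos
    obtain ⟨_, hlo, hhi⟩ := hg v hv
    have hpar : (R.headD []).countP (fun r => r ≤ v) % 2 = 0 := of_decide_eq_true hpv
    have hidx : ((R.headD []).countP (fun r => r ≤ v) + 1) % 2 = 1 := by omega
    rw [hidx] at hlo hhi
    exact ⟨hlo, hhi⟩
  have hbound0 : ((PySem.List.pyRange 0 32 1).countP
        (fun v => decide ((R.headD []).countP (fun r => r ≤ v) % 2 = 0)) : Int) ≠ 32 →
      -2 ≤ D.getD 0 0 ∧ D.getD 0 0 ≤ 1 := by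
    intro hne
    have hpos : 0 < (PySem.List.pyRange 0 32 1).countP
        (fun v => !decide ((R.headD []).countP (fun r => r ≤ v) % 2 = 0)) := by omega
    obtain ⟨v, hv, hpv⟩ := List.countP_pos_iff.mp hpos
    obtain ⟨_, hlo, hhi⟩ := hg v hv
    have hpar : ¬ ((R.headD []).countP (fun r => r ≤ v) % 2 = 0) := by
      intro hh
      rw [decide_eq_true hh] at hpv
      exact absurd hpv (by decide)
    have hidx : ((R.headD []).countP (fun r => r ≤ v) + 1) % 2 = 0 := by omega
    rw [hidx] at hlo hhi
    exact ⟨hlo, hhi⟩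
  -- B's value
  have hB : check_prop1_alt R D =
      (decide (16 ≤ (if pvP (D.getD 1 0) then ((PySem.List.pyRange 0 32 1).countP
            (fun v => decide ((R.headD []).countP (fun r => r ≤ v) % 2 = 0)) : Int) else 0)
          + (if pvP (D.getD 0 0) then 32 - ((PySem.List.pyRange 0 32 1).countP
            (fun v => decide ((R.headD []).countP (fun r => r ≤ v) % 2 = 0)) : Int) else 0)) &&
       decide (16 ≤ (if !pvP (D.getD 1 0) then ((PySem.List.pyRange 0 32 1).countP
            (fun v => decide ((R.headD []).countP (fun r => r ≤ v) % 2 = 0)) : Int) else 0)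
          + (if !pvP (D.getD 0 0) then 32 - ((PySem.List.pyRange 0 32 1).countP
            (fun v => decide ((R.headD []).countP (fun r => r ≤ v) % 2 = 0)) : Int) else 0))) := by
    simp only [check_prop1_alt]
    rw [hhead, hsw, counts_eval D _ (by omega) hbound1 hbound0]
    rfl
  rw [hA, hB]
  -- split the level-counts over the decoded bit
  have hs0 := countP_out_split (R.headD []) D pvP (PySem.List.pyRange 0 32 1)
  have hs1 := countP_out_split (R.headD []) D (fun o => !pvP o) (PySem.List.pyRange 0 32 1)
  apply and_congr_decide
  · rw [hs0]
    split_ifs <;> omega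
  · rw [hs1]
    split_ifs <;> omega
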